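-- pv_equiv track=rewrite | github.com/Abel94Phen/Codeforces-Solutions | B_Spreadsheets.py | toRC
-- ===== SOURCE A (Python) =====
-- def toRC(cell : str):
--     group_1 = []
--     group_2 = []
--     for char in cell:
--         if char.isalpha():
--             group_1.append(char)
--         else:
--             group_2.append(char)
--     result = ['R']
--     result.append("".join(group_2))
--     result.append('C')
--     column = 0
--     for i in range(len(group_1)):
--         prev = ord(group_1[i]) - ord('A')
--         counts = 26 ** (len(group_1) - i - 1)
--         column += prev * counts + counts
--     result.append(str(column))
--     return "".join(result)
-- ===== SOURCE B (Python) =====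
-- def toRC(cell: str):
--     digits = []
--     column = 0
--     for char in cell:
--         if char.isalpha():
--             column = column * 26 + (ord(char) - ord('A') + 1)
--         else:
--             digits.append(char)
--     return 'R' + ''.join(digits) + 'C' + str(column)
-- ===== Notes on version B (the rewrite author's own statement) =====
-- stated objective: faster
-- what changed: B replaces A's two-phase plan (partition into two lists, then a second indexed loop recomputing 26**k per letter) with a single pass threading a Horner accumulator column = column*26 + value, eliminating the intermediate letter list and the repeated exponentiations.
import Mathlib
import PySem

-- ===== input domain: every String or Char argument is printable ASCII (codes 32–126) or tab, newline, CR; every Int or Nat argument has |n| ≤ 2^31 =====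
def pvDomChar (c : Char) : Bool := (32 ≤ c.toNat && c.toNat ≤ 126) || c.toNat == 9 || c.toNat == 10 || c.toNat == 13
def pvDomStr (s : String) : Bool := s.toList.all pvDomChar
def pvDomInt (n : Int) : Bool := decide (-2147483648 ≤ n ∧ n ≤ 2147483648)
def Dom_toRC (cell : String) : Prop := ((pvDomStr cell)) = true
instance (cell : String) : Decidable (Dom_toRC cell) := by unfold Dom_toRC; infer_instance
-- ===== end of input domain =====

-- B folds one Horner accumulator through a single pass instead of A's partition + second power loop; return values only.

-- ===== PORT A =====
-- literal port of A: partition the characters into two lists, then a second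
-- indexed loop over range(len(group_1)) summing (ord(c)-65)*26^(len-i-1) + 26^(len-i-1);
-- the final "".join of ['R', group_2, 'C', str(column)] is the char-list concatenation (exact).
def toRC (cell : String) : String :=
  let gs := cell.toList.foldl
    (fun (g : List Char × List Char) char =>
      if PySem.Chars.isalpha char then (g.1 ++ [char], g.2) else (g.1, g.2 ++ [char]))
    ([], [])
  let column := (List.range gs.1.length).foldl
    (fun col i =>
      let prev : Int := (gs.1[i]!.toNat : Int) - 65
      let counts : Int := 26 ^ (gs.1.length - i - 1)
      col + prev * counts + counts) 0
  String.ofList ('R' :: gs.2 ++ 'C' :: PySem.Int.toChars column)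

-- ===== PORT B =====
-- literal port of B: one pass keeping (digit buffer, Horner column accumulator);
-- 'R' + digits + 'C' + str(column) is the char-list concatenation (exact).
def toRC_alt (cell : String) : String :=
  let st := cell.toList.foldl
    (fun (s : List Char × Int) char =>
      if PySem.Chars.isalpha char then (s.1, s.2 * 26 + ((char.toNat : Int) - 65 + 1))
      else (s.1 ++ [char], s.2))
    ([], 0)
  String.ofList ('R' :: st.1 ++ 'C' :: PySem.Int.toChars st.2)

-- ===== PRECONDITION & SPEC =====
def Spec_toRC (cell : String) (out : String) : Prop := out = toRC_alt cell
instance (cell : String) (out : String) : Decidable (Spec_toRC cell out) := by unfold Spec_toRC; infer_instance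

-- ===== CLAIM (what is proved, stated in full; the proofs are below) =====
def Claim_equal_toRC : Prop := ∀ (cell : String), Dom_toRC cell → Spec_toRC cell (toRC cell)

-- ===== LEMMAS AND PROOFS =====

-- Horner accumulator over a letter list, as B computes it.
def hornerAux (a : Int) (m : List Char) : Int :=
  m.foldl (fun c ch => c * 26 + ((ch.toNat : Int) - 65 + 1)) a

-- A's first loop partitions the characters by isalpha.
theorem partA (l : List Char) : ∀ (a b : List Char),
    l.foldl (fun (g : List Char × List Char) char =>
      if PySem.Chars.isalpha char then (g.1 ++ [char], g.2) else (g.1, g.2 ++ [char])) (a, b)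
    = (a ++ l.filter (fun c => PySem.Chars.isalpha c),
       b ++ l.filter (fun c => !PySem.Chars.isalpha c)) := by
  induction l with
  | nil => simp [List.foldl]
  | cons c l ih =>
    intro a b
    by_cases h : PySem.Chars.isalpha c = true <;>
      simp [List.foldl, List.filter, h, ih]

-- B's single loop computes (digits-so-far, Horner over the letters so far).
theorem partB (l : List Char) : ∀ (d : List Char) (acc : Int),
    l.foldl (fun (s : List Char × Int) char =>
      if PySem.Chars.isalpha char then (s.1, s.2 * 26 + ((char.toNat : Int) - 65 + 1))
      else (s.1 ++ [char], s.2)) (d, acc)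
    = (d ++ l.filter (fun c => !PySem.Chars.isalpha c),
       hornerAux acc (l.filter (fun c => PySem.Chars.isalpha c))) := by
  induction l with
  | nil => simp [List.foldl, hornerAux]
  | cons c l ih =>
    intro d acc
    by_cases h : PySem.Chars.isalpha c = true <;>
      simp [List.foldl, List.filter, h, ih, hornerAux]

theorem foldl_add_body (t u : Nat → Int) (r : List Nat) : ∀ (a : Int),
    r.foldl (fun col i => col + t i + u i) a = a + (r.map (fun i => t i + u i)).sum := by
  induction r with
  | nil => simp
  | cons i r ih => intro a; simp [List.foldl, ih]; ring

-- A's indexed power sum over a letter list equals B's Horner value.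
theorem sum_eq_horner (m : List Char) :
    ((List.range m.length).map
      (fun i => ((m[i]!.toNat : Int) - 65) * 26 ^ (m.length - i - 1) + 26 ^ (m.length - i - 1))).sum
    = hornerAux 0 m := by
  induction m using List.reverseRecOn with
  | nil => simp [hornerAux]
  | append_singleton l c ih =>
    have hlen : (l ++ [c]).length = l.length + 1 := by simp
    rw [hlen, List.range_succ, List.map_append, List.sum_append]
    have hmap : (List.range l.length).map
        (fun i => (((l ++ [c])[i]!.toNat : Int) - 65) * 26 ^ (l.length + 1 - i - 1)
          + 26 ^ (l.length + 1 - i - 1))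
        = (List.range l.length).map
        (fun i => 26 * (((l[i]!.toNat : Int) - 65) * 26 ^ (l.length - i - 1)
          + 26 ^ (l.length - i - 1))) := by
      apply List.map_congr_left
      intro i hi
      rw [List.mem_range] at hi
      have hget : (l ++ [c])[i]! = l[i]! := by
        rw [getElem!_pos (l ++ [c]) i (by simp; omega), getElem!_pos l i hi,
          List.getElem_append_left]
      have hexp : l.length + 1 - i - 1 = (l.length - i - 1) + 1 := by omega
      rw [hget, hexp, pow_succ]
      ring
    rw [hmap, List.sum_map_mul_left, ih]
    have hlast : (l ++ [c])[l.length]! = c := by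
      rw [getElem!_pos (l ++ [c]) l.length (by simp)]
      simp
    simp only [List.map_cons, List.map_nil, List.sum_cons, List.sum_nil, hlast]
    simp only [hornerAux, List.foldl_append, List.foldl]
    have h0 : l.length + 1 - l.length - 1 = 0 := by omega
    rw [h0]
    ring

-- A's second loop over range(len(group_1)) equals B's Horner accumulator value.
theorem rangeSum_eq (m : List Char) :
    (List.range m.length).foldl
      (fun col i => col + ((m[i]!.toNat : Int) - 65) * 26 ^ (m.length - i - 1)
        + 26 ^ (m.length - i - 1)) 0 = hornerAux 0 m := by
  rw [foldl_add_body, zero_add]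
  exact sum_eq_horner m

-- ===== VERDICT (by name: the statement is the Claim_ definition above) =====
theorem toRC_spec : Claim_equal_toRC := by
  intro cell _
  unfold Spec_toRC toRC toRC_alt
  rw [partA, partB]
  simp only [List.nil_append, rangeSum_eq]
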